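-- pv_equiv track=rewrite | github.com/yksi2023/Representational-Drift-In-Deep-Continual-Learning | cnn/tools/convert_bit_tf_to_npz.py | _detect_prefix
-- ===== SOURCE A (Python) =====
-- def _detect_prefix(names) -> str:
--     """Return a leading path fragment to strip so keys start with ``resnet/``.
--
--     Examples of detected prefixes:
--       - "" (already starts with 'resnet/')
--       - "keras_layer/"
--       - "StatefulPartitionedCall/keras_layer/"
--     """
--     # First, are any names already in canonical form?
--     if any(n.startswith("resnet/") for n in names):
--         return ""
--     # Otherwise, find the shortest path that, when stripped, leaves a
--     # 'resnet/' prefix. We check the first few vars.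
--     for n in names:
--         idx = n.find("resnet/")
--         if idx > 0:
--             return n[:idx]
--     return ""
-- ===== SOURCE B (Python) =====
-- def _detect_prefix(names) -> str:
--     """Single pass: a canonical 'resnet/' name wins immediately; otherwise
--     remember the first positive-index prefix and keep scanning."""
--     found_prefix = None
--     for n in names:
--         idx = n.find("resnet/")
--         if idx == 0:
--             return ""
--         if idx > 0 and found_prefix is None:
--             found_prefix = n[:idx]
--     return found_prefix if found_prefix is not None else ""
-- ===== Notes on version B (the rewrite author's own statement) =====
-- stated objective: alternative
-- what changed: Replaces A's two sequential scans (an any() startswith pass, then a find() pass) with one single pass keeping an optional found_prefix, returning '' immediately on a canonical name.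
import Mathlib
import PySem

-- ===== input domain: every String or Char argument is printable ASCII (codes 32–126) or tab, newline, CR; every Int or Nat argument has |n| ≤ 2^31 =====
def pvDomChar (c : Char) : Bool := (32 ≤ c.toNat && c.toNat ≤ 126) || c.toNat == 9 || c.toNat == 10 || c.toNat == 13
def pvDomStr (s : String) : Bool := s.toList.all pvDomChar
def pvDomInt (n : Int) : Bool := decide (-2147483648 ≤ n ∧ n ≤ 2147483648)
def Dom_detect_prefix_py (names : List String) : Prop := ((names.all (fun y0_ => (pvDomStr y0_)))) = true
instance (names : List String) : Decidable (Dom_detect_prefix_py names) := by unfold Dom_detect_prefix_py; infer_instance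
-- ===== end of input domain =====

-- B merges A's two sequential scans into one pass with an optional accumulator; objective: alternative (same cost).

-- ===== PORT A =====
-- second loop of A: first name with find('resnet/') > 0 yields its prefix, else ""
def detectA_loop : List String → String
  | [] => ""
  | n :: t =>
      let idx := PySem.Str.find n "resnet/"
      if 0 < idx then PySem.Str.slice n none (some idx) else detectA_loop t

def detect_prefix_py (names : List String) : String :=
  if names.any (fun n => PySem.Str.startswith n "resnet/") then ""
  else detectA_loop names

-- ===== PORT B =====
-- single pass with optional found_prefix; idx == 0 returns "" immediately
def detectB_go : List String → Option String → String
  | [], acc => acc.getD ""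
  | n :: t, acc =>
      let idx := PySem.Str.find n "resnet/"
      if idx = 0 then ""
      else if 0 < idx ∧ acc = none then detectB_go t (some (PySem.Str.slice n none (some idx)))
      else detectB_go t acc

def detect_prefix_py_alt (names : List String) : String := detectB_go names none

-- ===== PRECONDITION & SPEC =====
def Spec_detect_prefix_py (names : List String) (out : String) : Prop := out = detect_prefix_py_alt names
instance (names : List String) (out : String) : Decidable (Spec_detect_prefix_py names out) := by unfold Spec_detect_prefix_py; infer_instance

-- ===== CLAIM (what is proved, stated in full; the proofs are below) =====
def Claim_equal_detect_prefix_py : Prop := ∀ (names : List String), Dom_detect_prefix_py names → Spec_detect_prefix_py names (detect_prefix_py names)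

-- ===== LEMMAS AND PROOFS =====

-- find(sub) == 0 is exactly startswith(sub)
theorem chars_find_eq_zero_iff (s sub : List Char) :
    PySem.Chars.find s sub = 0 ↔ PySem.Chars.startswith s sub = true := by
  rw [PySem.Chars.startswith_iff]
  constructor
  · intro h
    have h0 : (0:Int) ≤ PySem.Chars.find s sub := le_of_eq h.symm
    have := (PySem.Chars.find_spec (s := s) (sub := sub) h0).1
    simpa [h] using this
  · intro hpre
    have hnn : (0:Int) ≤ PySem.Chars.find s sub :=
      (PySem.Chars.find_nonneg_iff _ _).mpr hpre.isInfix
    have hspec := PySem.Chars.find_spec (s := s) (sub := sub) hnn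
    by_contra hne
    have hpos : 0 < (PySem.Chars.find s sub).toNat := by omega
    have := hspec.2 0 hpos
    simp at this
    exact this hpre

-- the single-pass loop of B, related to A's two scans
theorem detectB_go_eq (xs : List String) : ∀ acc : Option String,
    detectB_go xs acc =
      if xs.any (fun n => PySem.Str.startswith n "resnet/") then ""
      else acc.getD (detectA_loop xs) := by
  induction xs with
  | nil => intro acc; simp [detectB_go, detectA_loop]
  | cons n t ih =>
    intro acc
    by_cases h0 : PySem.Chars.find n.toList ['r','e','s','n','e','t','/'] = 0
    · have hsw := (chars_find_eq_zero_iff _ _).mp h0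
      simp [detectB_go, h0, hsw]
    · have hsw : PySem.Chars.startswith n.toList ['r','e','s','n','e','t','/'] = false :=
        eq_false_of_ne_true (fun h => h0 ((chars_find_eq_zero_iff _ _).mpr h))
      by_cases hpos : 0 < PySem.Chars.find n.toList ['r','e','s','n','e','t','/']
      · cases acc with
        | none => simp [detectB_go, detectA_loop, h0, hpos, hsw, ih]
        | some p => simp [detectB_go, detectA_loop, h0, hpos, hsw, ih]
      · cases acc with
        | none => simp [detectB_go, detectA_loop, h0, hpos, hsw, ih]
        | some p => simp [detectB_go, detectA_loop, h0, hpos, hsw, ih]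

-- ===== VERDICT (by name: the statement is the Claim_ definition above) =====
theorem detect_prefix_py_spec : Claim_equal_detect_prefix_py := by
  intro names _
  unfold Spec_detect_prefix_py detect_prefix_py detect_prefix_py_alt
  rw [detectB_go_eq]
  split <;> simp
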